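-- pv_equiv track=rewrite | github.com/SebastienDeriaz/adventofcode | 2025/day02/day02_02.py | bigger_or_equal_mn
-- ===== SOURCE A (Python) =====
-- def _l_base_leads(x : int, n : int):
--     s = str(x)
--     L = len(s)
--
--     size = L // n
--     if L % n != 0:
--         base = None
--         leads = []
--     else:
--         base = int(s[:size])
--         leads = []
--         for i in range(L // size):
--             if i == 0:
--                 continue
--             leads.append(
--                 int(s[size*i:size*(i+1)])
--             )
--
--     return L, base, leads
--
-- def bigger_or_equal_mn(x : int, n : int):
--     L, base, leads = _l_base_leads(x, n)
--
--     if base is None: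
--         return 10**(L//n)
--
--     if L == 1:
--         return 0
--
--     output = base
--
--     for lead in leads:
--         if lead > base:
--             output += 1
--             break
--         elif lead == base:
--             continue
--         else:
--             break
--
--     return output
-- ===== SOURCE B (Python) =====
-- def bigger_or_equal_mn(x: int, n: int):
--     s = str(x)
--     L = len(s)
--     if L % n != 0:
--         return 10 ** (L // n)
--     if L == 1:
--         return 0
--     size = L // n
--     base = int(s[:size])
--     bump = 0
--     for i in range(n - 1, 0, -1):
--         c = int(s[size * i:size * (i + 1)])
--         if c > base:
--             bump = 1
--         elif c < base:
--             bump = 0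
--     return base + bump
-- ===== Notes on version B (the rewrite author's own statement) =====
-- stated objective: alternative
-- what changed: The chunk-splitting helper and the forward compare-and-break loop over the materialized leads list are replaced by a single inline backward scan over the chunks that keeps a 0/1 bump flag (no helper, no intermediate list, no early exit), added to the base at the end.
-- outside the precondition, e.g. on bigger_or_equal_mn(123, -2): A returns 0.01, B returns 0.01
import Mathlib
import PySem

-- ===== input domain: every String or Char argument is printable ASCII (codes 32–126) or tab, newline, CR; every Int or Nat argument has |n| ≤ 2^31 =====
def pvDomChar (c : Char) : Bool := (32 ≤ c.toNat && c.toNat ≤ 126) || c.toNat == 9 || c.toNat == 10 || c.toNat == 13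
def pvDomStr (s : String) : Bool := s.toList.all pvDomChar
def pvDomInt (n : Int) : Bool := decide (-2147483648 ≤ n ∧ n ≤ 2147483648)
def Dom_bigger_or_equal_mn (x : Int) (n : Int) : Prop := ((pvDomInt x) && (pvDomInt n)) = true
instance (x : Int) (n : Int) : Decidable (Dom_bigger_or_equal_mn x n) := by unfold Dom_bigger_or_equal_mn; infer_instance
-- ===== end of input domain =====

-- B replaces A's chunk-splitting helper plus forward compare-and-break loop by a single inline
-- backward scan over the chunks keeping a 0/1 "bump" flag (no helper, no leads list, no break);
-- objective: alternative (same cost, different traversal), equal return values on Pre_.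

-- ===== PORT A =====
/-- Port of `_l_base_leads`.  `str(x)` is ported on the list side (`PySem.Int.toChars`),
`int(chunk)` as `(PySem.Int.ofChars? chunk).getD 0`; the `.getD 0` default is only reached
where Python raises ValueError, which `Pre_` excludes. -/
def bigger_or_equal_mn_l_base_leads (x : Int) (n : Int) : Int × Option Int × List Int :=
  let s := PySem.Int.toChars x
  let L : Int := PySem.List.len s
  let size := PySem.Int.floordiv L n
  if PySem.Int.mod L n ≠ 0 then
    (L, none, [])
  else
    let base : Int := (PySem.Int.ofChars? (PySem.List.slice s none (some size))).getD 0
    let leads : List Int :=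
      (PySem.List.pyRange 0 (PySem.Int.floordiv L size) 1).foldl
        (fun acc i =>
          if i = 0 then acc
          else acc ++
            [(PySem.Int.ofChars? (PySem.List.slice s (some (size * i)) (some (size * (i + 1))))).getD 0])
        []
    (L, some base, leads)

/-- Port of A's `for lead in leads:` loop with its `break`/`continue` (second argument = `output`). -/
def bigger_or_equal_mn_aloop (base : Int) : List Int → Int → Int
  | [], out => out
  | lead :: rest, out =>
    if lead > base then out + 1
    else if lead = base then bigger_or_equal_mn_aloop base rest out
    else out

def bigger_or_equal_mn (x : Int) (n : Int) : Int :=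
  let t := bigger_or_equal_mn_l_base_leads x n
  match t.2.1 with
  | none => 10 ^ (PySem.Int.floordiv t.1 n).toNat  -- 10 ** (L // n); the exponent is ≥ 0 for n ≥ 1 (Pre_)
  | some base => if t.1 = 1 then 0 else bigger_or_equal_mn_aloop base t.2.2 base

-- ===== PORT B =====
def bigger_or_equal_mn_alt (x : Int) (n : Int) : Int :=
  let s := PySem.Int.toChars x
  let L : Int := PySem.List.len s
  if PySem.Int.mod L n ≠ 0 then 10 ^ (PySem.Int.floordiv L n).toNat
  else if L = 1 then 0
  else
    let size := PySem.Int.floordiv L n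
    let base : Int := (PySem.Int.ofChars? (PySem.List.slice s none (some size))).getD 0
    let bump : Int :=
      (PySem.List.pyRange (n - 1) 0 (-1)).foldl
        (fun bump i =>
          let c : Int :=
            (PySem.Int.ofChars? (PySem.List.slice s (some (size * i)) (some (size * (i + 1))))).getD 0
          if c > base then 1 else if c < base then 0 else bump)
        0
    base + bump

-- ===== PRECONDITION & SPEC =====
-- Pre_ excludes n ≤ 0 (Python A raises ZeroDivisionError at n = 0, and for n < 0 raises
-- ValueError or returns the float 10**negative, not an int) and x < 0 with n = len(str(x)),
-- where A raises ValueError on int('-'); B behaves like A (raises / returns a float) there too.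
def Pre_bigger_or_equal_mn (x : Int) (n : Int) : Prop :=
  1 ≤ n ∧ ¬(x < 0 ∧ n = PySem.List.len (PySem.Int.toChars x))
instance (x : Int) (n : Int) : Decidable (Pre_bigger_or_equal_mn x n) := by
  unfold Pre_bigger_or_equal_mn; infer_instance

def pvWitness_bigger_or_equal_mn : Int × Int := (1234, 2)

def Spec_bigger_or_equal_mn (x : Int) (n : Int) (out : Int) : Prop := out = bigger_or_equal_mn_alt x n
instance (x : Int) (n : Int) (out : Int) : Decidable (Spec_bigger_or_equal_mn x n out) := by
  unfold Spec_bigger_or_equal_mn; infer_instance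

-- ===== CLAIM (what is proved, stated in full; the proofs are below) =====
def Claim_equal_bigger_or_equal_mn : Prop := ∀ (x : Int) (n : Int), Dom_bigger_or_equal_mn x n → Pre_bigger_or_equal_mn x n → Spec_bigger_or_equal_mn x n (bigger_or_equal_mn x n)

-- ===== LEMMAS AND PROOFS =====

lemma pv_tdc_le (f : Nat) : ∀ (n : Nat) (acc : List Char),
    acc.length ≤ (Nat.toDigitsCore 10 f n acc).length := by
  induction f with
  | zero => intro n acc; simp [Nat.toDigitsCore]
  | succ f ih =>
    intro n acc
    simp only [Nat.toDigitsCore]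
    split
    · simp
    · exact le_trans (by simp) (ih _ _)

lemma pv_toDigits_ne_nil (n : Nat) : Nat.toDigits 10 n ≠ [] := by
  have h1 : 1 ≤ (Nat.toDigitsCore 10 (n + 1) n []).length := by
    simp only [Nat.toDigitsCore]
    split
    · simp
    · simpa using pv_tdc_le n (n / 10) [(n % 10).digitChar]
  intro hcon
  rw [show Nat.toDigits 10 n = Nat.toDigitsCore 10 (n + 1) n [] from rfl] at hcon
  rw [hcon] at h1
  simp at h1

lemma pv_toChars_ne_nil (x : Int) : PySem.Int.toChars x ≠ [] := by
  unfold PySem.Int.toChars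
  split
  · simp
  · exact pv_toDigits_ne_nil _

lemma pv_pyRange_down (a b : Int) :
    PySem.List.pyRange a b (-1) = (PySem.List.pyRange (b + 1) (a + 1) 1).reverse := by
  rw [PySem.List.pyRange_of_pos (b + 1) (a + 1) one_pos]
  simp only [PySem.List.pyRange]
  norm_num
  by_cases h : b < a
  · simp only [if_pos h]
    apply List.ext_getElem
    · simp
    · intro i h1 h2
      simp only [List.getElem_map, List.getElem_reverse, List.length_map, List.length_range,
        List.getElem_range]
      have hi : i < (a - b).toNat := by simpa using h1
      omega
  · simp only [if_neg h]
    simp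

lemma pv_aloop_core (b : Int) (vs : List Int) :
    bigger_or_equal_mn_aloop b vs b =
      b + vs.foldr (fun v st => if v > b then (1 : Int) else if v < b then 0 else st) 0 := by
  induction vs with
  | nil => simp [bigger_or_equal_mn_aloop]
  | cons v r ih =>
    simp only [bigger_or_equal_mn_aloop, List.foldr_cons]
    rcases lt_trichotomy v b with h | h | h
    · rw [if_neg (by omega), if_neg (by omega), if_neg (by omega), if_pos h]; ring
    · rw [if_neg (by omega), if_pos h, if_neg (by omega), if_neg (by omega)]; exact ih
    · rw [if_pos h, if_pos h]

-- ===== VERDICT (by name: the statement is the Claim_ definition above) =====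
theorem bigger_or_equal_mn_spec : Claim_equal_bigger_or_equal_mn := by
  intro x n _hdom hpre
  unfold Spec_bigger_or_equal_mn
  obtain ⟨hn, -⟩ := hpre
  have hLpos : 1 ≤ PySem.List.len (PySem.Int.toChars x) := by
    have h := pv_toChars_ne_nil x
    have h2 : 0 < (PySem.Int.toChars x).length := List.length_pos_iff.mpr h
    simp only [PySem.List.len_eq]
    omega
  simp only [bigger_or_equal_mn, bigger_or_equal_mn_l_base_leads, bigger_or_equal_mn_alt]
  revert hLpos
  generalize PySem.Int.toChars x = s
  generalize PySem.List.len s = L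
  intro hLpos
  by_cases hmod : PySem.Int.mod L n = 0
  · have hdvd : n ∣ L := (PySem.Int.mod_eq_zero_iff_dvd L n).mp hmod
    have hfd : PySem.Int.floordiv L n * n = L :=
      (PySem.Int.floordiv_mul_eq_self_iff_dvd L n).mpr hdvd
    have hnle : n ≤ L := Int.le_of_dvd (by omega) hdvd
    have hsz : 1 ≤ PySem.Int.floordiv L n := by
      rw [PySem.Int.le_floordiv_iff_mul_le (by omega : (0 : Int) < n)]; omega
    have hfs : PySem.Int.floordiv L (PySem.Int.floordiv L n) = n := by
      rw [PySem.Int.floordiv_eq_iff_of_pos (by omega : (0 : Int) < PySem.Int.floordiv L n)]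
      constructor
      · nlinarith
      · nlinarith
    rw [hfs]
    simp only [if_neg (show ¬(PySem.Int.mod L n ≠ 0) from by simpa using hmod)]
    revert hsz
    generalize PySem.Int.floordiv L n = size
    intro hsz
    by_cases hL1 : L = 1
    · simp [hL1]
    · simp only [if_neg hL1]
      generalize (PySem.Int.ofChars? (PySem.List.slice s none (some size))).getD 0 = base
      have hrange0 : PySem.List.pyRange 0 n 1 = 0 :: PySem.List.pyRange 1 n 1 := by
        simpa using PySem.List.pyRange_one_cons (a := 0) (b := n) (by omega)
      rw [hrange0]
      simp only [List.foldl_cons]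
      norm_num
      rw [PySem.List.foldl_congr_mem (PySem.List.pyRange 1 n 1)
          (fun acc i => if i = 0 then acc
            else acc ++ [(PySem.Int.ofChars? (PySem.List.slice s (some (size * i)) (some (size * (i + 1))))).getD 0])
          (fun acc i =>
            acc ++ [(PySem.Int.ofChars? (PySem.List.slice s (some (size * i)) (some (size * (i + 1))))).getD 0])
          []
          (by
            intro acc i hi
            have h1 := (PySem.List.mem_pyRange_one.mp hi).1
            simp only [if_neg (show ¬(i = 0) from by omega)])]
      rw [PySem.List.foldl_append_singleton_eq_map, List.nil_append]
      rw [pv_pyRange_down]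
      simp only [show ((0 : Int) + 1) = 1 from by norm_num, show n - 1 + 1 = n from by ring]
      rw [List.foldl_reverse]
      rw [pv_aloop_core]
      rw [List.foldr_map]
  · simp [hmod]
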